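-- pv_equiv track=rewrite | github.com/Hee-Jae/Algorithm | line_codingtest/2.py | solution
-- ===== SOURCE A (Python) =====
-- from collections import Counter
--
-- def check_issue(data, n, k):
--   for d in data:
--     if d < k:
--       return False
--
--   if sum(data) < 2*n*k:
--     return False
--   return True
--
-- def solution(research, n, k):
--   info = {}
--   for idx, re in enumerate(research):
--     count = Counter(re)
--     for key, value in count.items():
--       if key not in info:
--         info[key] = [0]*len(research)
--       info[key][idx] = value
--
--   result = {}
--   for key, value in info.items():
--     result[key] = 0
--     for i in range(len(value)-n+1):
--       if check_issue(value[i:i+n], n, k):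
--         result[key] += 1
--
--   max_value = 1
--   max_key = 'zz'
--   for key, value in result.items():
--     if value >= max_value and key < max_key:
--       max_value = value
--       max_key = key
--
--   if max_key == 'zz':
--     return 'None'
--   else:
--     return max_key
-- ===== SOURCE B (Python) =====
-- from collections import Counter
--
-- def count_valid_windows(vals, n, k):
--     # prefix sums + prefix counts of entries below k: one lookup per window end
--     pref_sum = [0]
--     pref_bad = [0]
--     s = 0
--     b = 0
--     for v in vals:
--         s += v
--         b += 1 if v < k else 0
--         pref_sum.append(s)
--         pref_bad.append(b)
--     cnt = 0
--     for i in range(len(vals) - n + 1):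
--         if pref_bad[i + n] == pref_bad[i] and pref_sum[i + n] - pref_sum[i] >= 2 * n * k:
--             cnt += 1
--     return cnt
--
-- def solution(research, n, k):
--     info = {}
--     for idx, re in enumerate(research):
--         for key, value in Counter(re).items():
--             info.setdefault(key, [0] * len(research))[idx] = value
--     max_value = 1
--     max_key = 'zz'
--     for key, vals in info.items():
--         res = count_valid_windows(vals, n, k)
--         if res >= max_value and key < max_key:
--             max_value = res
--             max_key = key
--     return 'None' if max_key == 'zz' else max_key
-- ===== Notes on version B (the rewrite author's own statement) =====
-- stated objective: alternative
-- what changed: Each per-character window is tested by O(1) lookups in precomputed prefix sums and prefix counts of entries below k, instead of slicing the list and rescanning all n entries per window, and the per-key counting dict is folded directly into the selection loop.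
-- outside the precondition, e.g. on solution(['ab'], -1, 0): A returns 'a', B raises IndexError
import Mathlib
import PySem

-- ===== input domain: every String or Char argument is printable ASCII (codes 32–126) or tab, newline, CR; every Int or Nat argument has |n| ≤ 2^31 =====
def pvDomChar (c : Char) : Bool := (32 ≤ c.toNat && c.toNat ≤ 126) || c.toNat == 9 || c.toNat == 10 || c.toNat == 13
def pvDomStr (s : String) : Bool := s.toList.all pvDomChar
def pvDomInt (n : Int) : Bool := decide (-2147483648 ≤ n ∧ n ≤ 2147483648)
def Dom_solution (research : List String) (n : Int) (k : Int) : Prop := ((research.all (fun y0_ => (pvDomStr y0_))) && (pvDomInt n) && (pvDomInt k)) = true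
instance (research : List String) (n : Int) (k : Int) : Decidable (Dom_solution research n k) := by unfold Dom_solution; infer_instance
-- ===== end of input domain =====

-- B tests each length-n window by lookups in precomputed prefix sums / prefix counts of
-- entries below k instead of slicing and rescanning the window (objective: alternative).

-- ===== PORT A =====
def check_issue (data : List Int) (n : Int) (k : Int) : Bool :=
  if data.any (fun d => decide (d < k)) then false
  else if data.sum < 2 * n * k then false
  else true

def buildInfoA (research : List String) : PySem.Dict String (List Int) :=
  (PySem.List.enumerate research).foldl
    (fun info p =>
      (PySem.Dict.counter p.2.toList).items.foldl
        (fun info q =>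
          let key := String.singleton q.1
          let info := if info.contains key then info
                      else info.insert key (PySem.List.pyRepeat [(0 : Int)] (research.length : Int))
          info.insert key (PySem.List.pySetD (info.getD key []) p.1 q.2))
        info)
    PySem.Dict.empty

def solution (research : List String) (n : Int) (k : Int) : String :=
  let info := buildInfoA research
  let result : PySem.Dict String Int :=
    info.items.foldl
      (fun result q =>
        (PySem.List.pyRange 0 ((q.2.length : Int) - n + 1)).foldl
          (fun result i =>
            if check_issue (PySem.List.slice q.2 (some i) (some (i + n))) n k
            then result.insert q.1 (result.getD q.1 0 + 1)
            else result)
          (result.insert q.1 0))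
      PySem.Dict.empty
  let sel :=
    result.items.foldl
      (fun (st : Int × String) q =>
        if q.2 ≥ st.1 ∧ q.1 < st.2 then (q.2, q.1) else st)
      (1, "zz")
  if sel.2 = "zz" then "None" else sel.2

-- ===== PORT B =====
def countValidWindows (vals : List Int) (n : Int) (k : Int) : Int :=
  let pre := vals.foldl
    (fun (st : List Int × List Int × Int × Int) v =>
      let s := st.2.2.1 + v
      let b := st.2.2.2 + (if v < k then (1 : Int) else 0)
      (st.1 ++ [s], st.2.1 ++ [b], s, b))
    ([0], [0], 0, 0)
  (PySem.List.pyRange 0 ((vals.length : Int) - n + 1)).foldl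
    (fun cnt i =>
      if PySem.List.pyGetD pre.2.1 (i + n) 0 = PySem.List.pyGetD pre.2.1 i 0 ∧
         PySem.List.pyGetD pre.1 (i + n) 0 - PySem.List.pyGetD pre.1 i 0 ≥ 2 * n * k
      then cnt + 1 else cnt)
    0

def buildInfoB (research : List String) : PySem.Dict String (List Int) :=
  (PySem.List.enumerate research).foldl
    (fun info p =>
      (PySem.Dict.counter p.2.toList).items.foldl
        (fun info q =>
          let key := String.singleton q.1
          let info := info.setdefault key (PySem.List.pyRepeat [(0 : Int)] (research.length : Int))
          info.insert key (PySem.List.pySetD (info.getD key []) p.1 q.2))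
        info)
    PySem.Dict.empty

def solution_alt (research : List String) (n : Int) (k : Int) : String :=
  let info := buildInfoB research
  let sel :=
    info.items.foldl
      (fun (st : Int × String) q =>
        let res := countValidWindows q.2 n k
        if res ≥ st.1 ∧ q.1 < st.2 then (res, q.1) else st)
      (1, "zz")
  if sel.2 = "zz" then "None" else sel.2

-- ===== PRECONDITION & SPEC =====
-- n is the window length of the task; Pre_ restricts to the natural domain 0 ≤ n. For n < 0 A's
-- windows come from Python's negative-slice wraparound (an implementation artefact) and B raises IndexError.
def Pre_solution (research : List String) (n : Int) (k : Int) : Prop := 0 ≤ n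
instance (research : List String) (n : Int) (k : Int) : Decidable (Pre_solution research n k) := by unfold Pre_solution; infer_instance

def pvWitness_solution : List String × Int × Int := (["aab", "ab"], 1, 1)

def Spec_solution (research : List String) (n : Int) (k : Int) (out : String) : Prop := out = solution_alt research n k
instance (research : List String) (n : Int) (k : Int) (out : String) : Decidable (Spec_solution research n k out) := by unfold Spec_solution; infer_instance

-- ===== CLAIM (what is proved, stated in full; the proofs are below) =====
def Claim_equal_solution : Prop := ∀ (research : List String) (n : Int) (k : Int), Dom_solution research n k → Pre_solution research n k → Spec_solution research n k (solution research n k)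

-- ===== LEMMAS AND PROOFS =====

theorem setdefault_eq_ite {κ ν : Type} [BEq κ] (d : PySem.Dict κ ν) (k : κ) (v : ν) :
    d.setdefault k v = if d.contains k then d else d.insert k v := by
  by_cases h : d.contains k = true
  · rw [PySem.Dict.setdefault_of_contains d v h, if_pos h]
  · rw [PySem.Dict.setdefault_of_not_contains d v (by simpa using h), if_neg h]

theorem buildInfoB_eq (research : List String) : buildInfoB research = buildInfoA research := by
  unfold buildInfoA buildInfoB
  congr 1
  funext info p
  congr 1
  funext info q
  simp only [setdefault_eq_ite]

theorem nodup_keys_foldl {κ ν β : Type} [BEq κ] (l : List β) (g : PySem.Dict κ ν → β → PySem.Dict κ ν)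
    (h : ∀ d x, d.keys.Nodup → (g d x).keys.Nodup) :
    ∀ d : PySem.Dict κ ν, d.keys.Nodup → (l.foldl g d).keys.Nodup := by
  induction l with
  | nil => intro d hd; simpa using hd
  | cons x xs ih => intro d hd; exact ih _ (h d x hd)

theorem nodup_keys_buildInfoA (research : List String) : (buildInfoA research).keys.Nodup := by
  unfold buildInfoA
  refine nodup_keys_foldl _ _ ?_ _ (by rw [PySem.Dict.keys_empty]; exact List.nodup_nil)
  intro d p hd
  refine nodup_keys_foldl _ _ ?_ _ hd
  intro d q hdq
  by_cases h : d.contains (String.singleton q.1) = true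
  · simp only [if_pos h]
    rw [PySem.Dict.keys_insert_of_contains d _ h]
    exact hdq
  · simp only [if_neg h]
    rw [PySem.Dict.keys_insert_of_contains _ _ (PySem.Dict.contains_insert_self d _ _),
        PySem.Dict.keys_insert_of_not_contains d _ (by simpa using h)]
    rw [List.nodup_append]
    refine ⟨hdq, List.nodup_singleton _, ?_⟩
    intro a ha b hb hab
    rcases List.mem_singleton.mp hb with rfl
    exact h ((PySem.Dict.contains_iff_mem_keys d _).mpr (hab ▸ ha))

-- A's inner dict loop only touches the entry at `key`: it equals a scalar fold.
theorem foldl_insert_getD_add (l : List Int) (p : Int → Bool) (key : String)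
    (r : PySem.Dict String Int) :
    ∀ c : Int,
    l.foldl (fun r i => if p i then r.insert key (r.getD key 0 + 1) else r) (r.insert key c)
      = r.insert key (l.foldl (fun c i => if p i then c + 1 else c) c) := by
  induction l with
  | nil => intro c; rfl
  | cons x xs ih =>
    intro c
    simp only [List.foldl_cons]
    by_cases h : p x = true
    · rw [if_pos h, if_pos h, PySem.Dict.getD_insert_self, PySem.Dict.insert_insert_self, ih]
    · rw [if_neg h, if_neg h, ih]

-- prefix lists built by B's first loop
def prefSums (vals : List Int) : List Int :=
  (List.range (vals.length + 1)).map (fun j => (vals.take j).sum)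

def prefBads (k : Int) (vals : List Int) : List Int :=
  (List.range (vals.length + 1)).map (fun j => ((vals.take j).countP (fun v => decide (v < k)) : Int))

theorem pre_fold_eq (k : Int) (vals : List Int) :
    vals.foldl
      (fun (st : List Int × List Int × Int × Int) v =>
        let s := st.2.2.1 + v
        let b := st.2.2.2 + (if v < k then (1 : Int) else 0)
        (st.1 ++ [s], st.2.1 ++ [b], s, b))
      ([0], [0], 0, 0)
    = (prefSums vals, prefBads k vals, vals.sum, (vals.countP (fun v => decide (v < k)) : Int)) := by
  induction vals using List.reverseRecOn with
  | nil => simp [prefSums, prefBads]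
  | append_singleton xs v ih =>
    rw [List.foldl_append, ih]
    simp only [List.foldl_cons, List.foldl_nil]
    have hS : prefSums (xs ++ [v]) = prefSums xs ++ [xs.sum + v] := by
      unfold prefSums
      rw [List.length_append, List.length_singleton, List.range_succ, List.map_append]
      congr 1
      · refine List.map_congr_left ?_
        intro j hj
        rw [List.take_append_of_le_length (by simpa using Nat.lt_succ_iff.mp (List.mem_range.mp hj))]
      · simp
    have hB : prefBads k (xs ++ [v]) =
        prefBads k xs ++ [(xs.countP (fun v => decide (v < k)) : Int) + (if v < k then (1:Int) else 0)] := by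
      unfold prefBads
      rw [List.length_append, List.length_singleton, List.range_succ, List.map_append]
      congr 1
      · refine List.map_congr_left ?_
        intro j hj
        rw [List.take_append_of_le_length (by simpa using Nat.lt_succ_iff.mp (List.mem_range.mp hj))]
      · simp only [List.map_cons, List.map_nil]
        rw [List.take_of_length_le (by simp), List.countP_append]
        by_cases h : v < k <;> simp [h]
    rw [hS, hB]
    by_cases h : v < k <;>
      simp [h, List.countP_append, List.sum_append]

-- the central per-character count equality
theorem count_eq (vals : List Int) (n k : Int) (hn : 0 ≤ n) :
    (PySem.List.pyRange 0 ((vals.length : Int) - n + 1)).foldl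
      (fun c i =>
        if check_issue (PySem.List.slice vals (some i) (some (i + n))) n k
        then c + 1 else c) (0 : Int)
    = countValidWindows vals n k := by
  obtain ⟨m, rfl⟩ : ∃ m : Nat, n = (m : Int) := ⟨n.toNat, (Int.toNat_of_nonneg hn).symm⟩
  unfold countValidWindows
  simp only [pre_fold_eq k vals]
  refine PySem.List.foldl_congr_mem _ _ _ _ ?_
  intro c i hi
  obtain ⟨h0, h1⟩ := PySem.List.mem_pyRange_one.mp hi
  obtain ⟨a, rfl⟩ : ∃ a : Nat, i = (a : Int) := ⟨i.toNat, (Int.toNat_of_nonneg h0).symm⟩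
  have ham : a + m ≤ vals.length := by omega
  have key : check_issue (PySem.List.slice vals (some ↑a) (some (↑a + ↑m))) (↑m) k = true ↔
      (PySem.List.pyGetD (prefBads k vals) (↑a + ↑m) 0 = PySem.List.pyGetD (prefBads k vals) ↑a 0 ∧
       PySem.List.pyGetD (prefSums vals) (↑a + ↑m) 0 - PySem.List.pyGetD (prefSums vals) ↑a 0 ≥ 2 * (↑m) * k) := by
    rw [PySem.List.slice_natCast_add, ← Nat.cast_add, PySem.List.pyGetD_natCast,
        PySem.List.pyGetD_natCast, PySem.List.pyGetD_natCast, PySem.List.pyGetD_natCast]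
    simp only [prefSums, prefBads]
    rw [PySem.List.getD_map_range _ _ _ _ (by omega), PySem.List.getD_map_range _ _ _ _ (by omega),
        PySem.List.getD_map_range _ _ _ _ (by omega), PySem.List.getD_map_range _ _ _ _ (by omega)]
    have htake : vals.take (a + m) = vals.take a ++ (vals.drop a).take m := List.take_add
    rw [htake, List.countP_append, List.sum_append]
    constructor
    · intro h
      unfold check_issue at h
      by_cases hany : ((vals.drop a).take m).any (fun d => decide (d < k)) = true
      · rw [if_pos hany] at h; exact absurd h (by simp)
      · rw [if_neg hany] at h
        by_cases hs : ((vals.drop a).take m).sum < 2 * (↑m : Int) * k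
        · rw [if_pos hs] at h; exact absurd h (by simp)
        · have hcnt : List.countP (fun v => decide (v < k)) ((vals.drop a).take m) = 0 :=
            List.countP_eq_zero.mpr (List.any_eq_false.mp (by simpa using hany))
          constructor
          · push_cast; omega
          · omega
    · rintro ⟨h1, h2⟩
      have hcnt : List.countP (fun v => decide (v < k)) ((vals.drop a).take m) = 0 := by
        push_cast at h1; omega
      have hany : ((vals.drop a).take m).any (fun d => decide (d < k)) = false :=
        List.any_eq_false.mpr (List.countP_eq_zero.mp hcnt)
      unfold check_issue
      rw [if_neg (by simp [hany]), if_neg (by omega)]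
  split_ifs with hA hB hC
  · rfl
  · exact absurd (key.mp hA) hB
  · exact absurd (key.mpr hC) hA
  · rfl

-- ===== VERDICT (by name: the statement is the Claim_ definition above) =====
theorem solution_spec : Claim_equal_solution := by
  intro research n k hdom hpre
  unfold Spec_solution solution solution_alt
  rw [buildInfoB_eq]
  have hfun : (fun (result : PySem.Dict String Int) (q : String × List Int) =>
      (PySem.List.pyRange 0 ((q.2.length : Int) - n + 1)).foldl
        (fun result i =>
          if check_issue (PySem.List.slice q.2 (some i) (some (i + n))) n k
          then result.insert q.1 (result.getD q.1 0 + 1)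
          else result)
        (result.insert q.1 0))
      = (fun (result : PySem.Dict String Int) (q : String × List Int) =>
          result.insert q.1 (countValidWindows q.2 n k)) := by
    funext r q
    rw [foldl_insert_getD_add (PySem.List.pyRange 0 ((q.2.length : Int) - n + 1))
        (fun i => check_issue (PySem.List.slice q.2 (some i) (some (i + n))) n k) q.1 r 0]
    exact congrArg (fun z => r.insert q.1 z) (count_eq q.2 n k hpre)
  simp only [hfun]
  have hnd : (List.map (fun (q : String × List Int) => q.1) (buildInfoA research).items).Nodup := by
    have := nodup_keys_buildInfoA research
    simpa [PySem.Dict.keys] using this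
  have hitems : ((buildInfoA research).items.foldl
        (fun (result : PySem.Dict String Int) q => result.insert q.1 (countValidWindows q.2 n k))
        PySem.Dict.empty).items
      = (buildInfoA research).items.map (fun q => (q.1, countValidWindows q.2 n k)) := by
    simpa using PySem.Dict.items_foldl_insert_fresh (buildInfoA research).items
      (fun q => q.1) (fun q => countValidWindows q.2 n k) PySem.Dict.empty
      (fun a _ => PySem.Dict.contains_empty _) hnd
  rw [hitems, List.foldl_map]
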